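-- pv_equiv track=rewrite | github.com/jxmen/Crack-the-Coding-Interview | 1441-build-an-array-with-stack-operations/1441-build-an-array-with-stack-operations.py | buildArray2
-- ===== SOURCE A (Python) =====
-- from typing import List
--
-- def buildArray2(target: List[int], n: int) -> List[str]:
--     operations = []
--     num = 1
--     nums = []
--     target_pointer = 0
--
--     while num <= n:
--         # 같다면 중지
--         if nums == target:
--             return operations
--
--         # num 일단 nums에 넣고, pointer값과 다르다면 pop 한다.
--         operations.append("Push")
--         nums.append(num)
--
--         # pointer값과 다르면 pop
--         if num != target[target_pointer]:
--             operations.append("Pop")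
--             nums.pop()
--         else:
--             target_pointer += 1
--
--         num += 1
--
--     return operations
-- ===== SOURCE B (Python) =====
-- from typing import List
--
-- def buildArray2(target: List[int], n: int) -> List[str]:
--     # Closed-form per target element: emit (t-prev-1) Push/Pop pairs then a Push
--     # for each reachable element; on an unreachable element flush pairs up to n.
--     ops = []
--     prev = 0
--     for t in target:
--         if prev < t <= n:
--             ops += ["Push", "Pop"] * (t - prev - 1)
--             ops.append("Push")
--             prev = t
--         else:
--             ops += ["Push", "Pop"] * (n - prev)
--             return ops
--     return ops
-- ===== Notes on version B (the rewrite author's own statement) =====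
-- stated objective: faster
-- what changed: Replace A's per-number loop with its whole-list 'nums == target' comparison each iteration by a single pass over target that emits each gap's Push/Pop pairs in closed form.
import Mathlib
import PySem

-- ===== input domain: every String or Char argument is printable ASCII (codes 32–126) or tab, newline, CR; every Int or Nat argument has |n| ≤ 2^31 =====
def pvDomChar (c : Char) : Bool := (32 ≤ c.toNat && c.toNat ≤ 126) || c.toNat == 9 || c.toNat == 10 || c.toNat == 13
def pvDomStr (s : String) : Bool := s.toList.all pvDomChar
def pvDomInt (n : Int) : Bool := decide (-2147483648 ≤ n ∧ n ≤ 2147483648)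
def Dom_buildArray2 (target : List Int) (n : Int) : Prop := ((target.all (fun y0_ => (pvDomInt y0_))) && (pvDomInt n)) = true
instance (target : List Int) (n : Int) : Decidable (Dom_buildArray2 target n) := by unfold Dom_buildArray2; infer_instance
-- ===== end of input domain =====

-- B replaces A's per-number loop (with a whole-list comparison every iteration) by a
-- single pass over target emitting each gap's Push/Pop pairs in closed form (faster).

-- ===== PORT A =====
-- A's while loop, state (operations, num, nums, target_pointer); the loop runs while
-- num ≤ n starting from num = 1, so n.toNat iterations of fuel are exact.
def buildArray2Go (target : List Int) (n : Int) (ops : List String)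
    (num : Int) (nums : List Int) (tp : Int) : Nat → List String
  | 0 => ops
  | fuel + 1 =>
    if num ≤ n then
      if nums = target then ops
      else
        -- operations.append("Push"); nums.append(num)
        let ops1 := ops ++ ["Push"]
        let nums1 := nums ++ [num]
        match PySem.List.pyGet? target tp with
        | none => ops1  -- target[target_pointer] raises IndexError in Python; unreachable (nums = target.take tp)
        | some t =>
          if num ≠ t then
            -- operations.append("Pop"); nums.pop()
            buildArray2Go target n (ops1 ++ ["Pop"]) (num + 1) nums1.dropLast tp fuel
          else
            buildArray2Go target n ops1 (num + 1) nums1 (tp + 1) fuel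
    else ops

def buildArray2 (target : List Int) (n : Int) : List String :=
  buildArray2Go target n [] 1 [] 0 n.toNat

-- ===== PORT B =====
def buildArray2AltGo (n : Int) (prev : Int) : List Int → List String
  | [] => []
  | t :: rest =>
    if prev < t ∧ t ≤ n then
      PySem.List.pyRepeat ["Push", "Pop"] (t - prev - 1) ++ ["Push"] ++ buildArray2AltGo n t rest
    else
      PySem.List.pyRepeat ["Push", "Pop"] (n - prev)

def buildArray2_alt (target : List Int) (n : Int) : List String :=
  buildArray2AltGo n 0 target

-- ===== PRECONDITION & SPEC =====
def Spec_buildArray2 (target : List Int) (n : Int) (out : List String) : Prop := out = buildArray2_alt target n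
instance (target : List Int) (n : Int) (out : List String) : Decidable (Spec_buildArray2 target n out) := by unfold Spec_buildArray2; infer_instance

-- ===== CLAIM (what is proved, stated in full; the proofs are below) =====
def Claim_equal_buildArray2 : Prop := ∀ (target : List Int) (n : Int), Dom_buildArray2 target n → Spec_buildArray2 target n (buildArray2 target n)

-- ===== LEMMAS AND PROOFS =====

-- A run of mismatches ending in a match at num = t (with t ≤ n).
theorem skip_to_match (target : List Int) (n t : Int) (nums : List Int) (tp : Int)
    (hget : PySem.List.pyGet? target tp = some t) (hne : nums ≠ target) (htn : t ≤ n) :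
    ∀ (k : Nat) (num : Int) (ops : List String), num + k = t →
      buildArray2Go target n ops num nums tp (n + 1 - num).toNat =
        buildArray2Go target n (ops ++ PySem.List.pyRepeat ["Push", "Pop"] k ++ ["Push"])
          (t + 1) (nums ++ [t]) (tp + 1) (n + 1 - (t + 1)).toNat := by
  intro k
  induction k with
  | zero =>
    intro num ops hnum
    have hnt : num = t := by omega
    subst hnt
    rw [show (n + 1 - num).toNat = (n + 1 - (num + 1)).toNat + 1 by omega]
    rw [buildArray2Go, if_pos htn, if_neg hne]
    simp only [hget]
    rw [if_neg (by omega : ¬ num ≠ num)]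
    simp [PySem.List.pyRepeat]
  | succ k ih =>
    intro num ops hnum
    have hle : num ≤ n := by omega
    rw [show (n + 1 - num).toNat = (n + 1 - (num + 1)).toNat + 1 by omega]
    rw [buildArray2Go, if_pos hle, if_neg hne]
    simp only [hget]
    have hnet : num ≠ t := by omega
    simp only [if_pos hnet, List.dropLast_concat]
    rw [ih (num + 1) (ops ++ ["Push"] ++ ["Pop"]) (by omega)]
    congr 2
    have hstep : PySem.List.pyRepeat (["Push", "Pop"] : List String) ((k : Int) + 1)
        = ["Push", "Pop"] ++ PySem.List.pyRepeat ["Push", "Pop"] (k : Int) := by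
      simp [PySem.List.pyRepeat, List.replicate_succ]
    push_cast
    rw [hstep]
    simp

-- A run of mismatches running off the end at num = n + 1 (target[tp] never equals any remaining num).
theorem skip_to_end (target : List Int) (n t : Int) (nums : List Int) (tp : Int)
    (hget : PySem.List.pyGet? target tp = some t) (hne : nums ≠ target) :
    ∀ (fuel : Nat) (num : Int) (ops : List String), fuel = (n + 1 - num).toNat →
      (∀ num' : Int, num ≤ num' → num' ≤ n → num' ≠ t) →
      buildArray2Go target n ops num nums tp fuel =
        ops ++ PySem.List.pyRepeat ["Push", "Pop"] (n + 1 - num) := by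
  intro fuel
  induction fuel with
  | zero =>
    intro num ops hfuel hmiss
    rw [buildArray2Go]
    have : (n + 1 - num) ≤ 0 := by omega
    simp [PySem.List.pyRepeat, Int.toNat_of_nonpos this]
  | succ fuel ih =>
    intro num ops hfuel hmiss
    have hle : num ≤ n := by omega
    rw [buildArray2Go, if_pos hle, if_neg hne]
    simp only [hget]
    have hnet : num ≠ t := hmiss num le_rfl hle
    simp only [if_pos hnet, List.dropLast_concat]
    rw [ih (num + 1) (ops ++ ["Push"] ++ ["Pop"]) (by omega)
        (fun num' h1 h2 => hmiss num' (by omega) h2)]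
    have hrep : PySem.List.pyRepeat (["Push", "Pop"] : List String) (n + 1 - num)
        = ["Push", "Pop"] ++ PySem.List.pyRepeat ["Push", "Pop"] (n + 1 - (num + 1)) := by
      simp [PySem.List.pyRepeat]
      rw [show (n + 1 - num).toNat = (n + 1 - (num + 1)).toNat + 1 by omega]
      simp [List.replicate_succ]
    rw [hrep]
    simp

-- Main invariant: at an element boundary (num = prev + 1, nums is the matched prefix),
-- A's remaining run equals B's processing of the remaining suffix.
theorem main_inv (n : Int) :
    ∀ (rest done : List Int) (prev : Int) (ops : List String),
      buildArray2Go (done ++ rest) n ops (prev + 1) done (done.length : Int)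
          (n + 1 - (prev + 1)).toNat =
        ops ++ buildArray2AltGo n prev rest := by
  intro rest
  induction rest with
  | nil =>
    intro done prev ops
    cases h : (n + 1 - (prev + 1)).toNat with
    | zero => simp [buildArray2Go, buildArray2AltGo]
    | succ m => simp [buildArray2Go, buildArray2AltGo]
  | cons t rest ih =>
    intro done prev ops
    have hget : PySem.List.pyGet? (done ++ t :: rest) (done.length : Int) = some t :=
      PySem.List.pyGet?_append_length done rest t
    have hne : done ≠ done ++ t :: rest := by
      intro h
      have := congrArg List.length h
      simp at this
    rw [buildArray2AltGo]
    by_cases hc : prev < t ∧ t ≤ n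
    · rw [skip_to_match (done ++ t :: rest) n t done (done.length : Int) hget hne hc.2
          (t - prev - 1).toNat (prev + 1) ops (by omega)]
      have : ((done.length : Int) + 1) = (((done ++ [t]).length : Int)) := by simp
      rw [this, show done ++ t :: rest = (done ++ [t]) ++ rest by simp]
      rw [ih (done ++ [t]) t]
      simp only [if_pos hc]
      rw [show ((t - prev - 1).toNat : Int) = t - prev - 1 by omega]
      simp
    · rw [skip_to_end (done ++ t :: rest) n t done (done.length : Int) hget hne
          (n + 1 - (prev + 1)).toNat (prev + 1) ops rfl]
      · simp only [if_neg hc]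
        rw [show n + 1 - (prev + 1) = n - prev by omega]
      · intro num' h1 h2 hEq
        subst hEq
        exact hc ⟨by omega, h2⟩

-- ===== VERDICT (by name: the statement is the Claim_ definition above) =====
theorem buildArray2_spec : Claim_equal_buildArray2 := by
  intro target n _
  unfold Spec_buildArray2 buildArray2 buildArray2_alt
  have h := main_inv n target [] 0 []
  rw [show n.toNat = (n + 1 - (0 + 1)).toNat by omega]
  simpa using h
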